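-- pv_equiv track=rewrite | github.com/pypi-data/pypi-mirror-337 | packages/tucan/tucan-0.5.0-py3-none-any.whl/tucan/string_utils.py | eat_spaces
-- ===== SOURCE A (Python) =====
-- from typing import List
--
-- def get_indent(line: str) -> str:
--     """Get the indentation leading a line"""
--     _indent = ""
--     for char in line:
--         if char == "\t":
--             _indent += "    "
--         elif char != " ":
--             return _indent
--         else:
--             _indent += " "
--     return _indent
--
-- def eat_spaces(code: List[str]) -> List[str]:
--     """Remove unwanted multiple spacing"""
--     new_stmt = []
--     for line in code:
--         line = line.replace("\t","  ")
--         out = get_indent(line)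
--
--         prevchar = None
--         for i, char in enumerate(line.strip()):
--             try:
--                 next_char = line.strip()[i + 1]
--             except IndexError:
--                 next_char = None
--
--             if char == " ":
--                 if prevchar not in [" ", ":", ";", ","] and next_char not in [
--                     ":",
--                     ";",
--                     ",",
--                 ]:
--                     out += char
--                 else:
--                     pass  # no space needed if " " precedes, or a punctuation is before or after
--             else:
--                 out += char
--
--             prevchar = char
--         new_stmt.append(out)
--     return new_stmt
-- ===== SOURCE B (Python) =====
-- from typing import List
--
-- def get_indent(line: str) -> str:
--     """Get the indentation leading a line"""
--     _indent = ""
--     for char in line: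
--         if char == "\t":
--             _indent += "    "
--         elif char != " ":
--             return _indent
--         else:
--             _indent += " "
--     return _indent
--
-- def _fix_line(line: str) -> str:
--     # Word/gap view: split the stripped content on single spaces; a run of k
--     # spaces shows up as k-1 empty parts between two words.  The run's first
--     # space survives iff the previous word does not end in :;, and (k > 1 or
--     # the next word does not start with :;,); all other spaces vanish.
--     line = line.replace("\t", "  ")
--     parts = line.strip().split(" ")
--     words = [parts[0]]
--     last = parts[0][-1:]
--     gap = 0
--     for part in parts[1:]:
--         if part:
--             if last not in (":", ";", ",") and (gap > 0 or part[0] not in (":", ";", ",")):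
--                 words.append(" ")
--             words.append(part)
--             last = part[-1:]
--             gap = 0
--         else:
--             gap += 1
--     return get_indent(line) + "".join(words)
--
-- def eat_spaces(code: List[str]) -> List[str]:
--     """Remove unwanted multiple spacing"""
--     return [_fix_line(line) for line in code]
-- ===== Notes on version B (the rewrite author's own statement) =====
-- stated objective: faster
-- what changed: A scans the stripped line character by character with a mutable prevchar, re-slicing line.strip() for the lookahead at every character inside a try/except; B instead splits the stripped line once on spaces into words and gap counts and rebuilds it word by word, inserting at most one separator space per gap from the previous word's last char, the gap length and the next word's first char.
import Mathlib
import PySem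

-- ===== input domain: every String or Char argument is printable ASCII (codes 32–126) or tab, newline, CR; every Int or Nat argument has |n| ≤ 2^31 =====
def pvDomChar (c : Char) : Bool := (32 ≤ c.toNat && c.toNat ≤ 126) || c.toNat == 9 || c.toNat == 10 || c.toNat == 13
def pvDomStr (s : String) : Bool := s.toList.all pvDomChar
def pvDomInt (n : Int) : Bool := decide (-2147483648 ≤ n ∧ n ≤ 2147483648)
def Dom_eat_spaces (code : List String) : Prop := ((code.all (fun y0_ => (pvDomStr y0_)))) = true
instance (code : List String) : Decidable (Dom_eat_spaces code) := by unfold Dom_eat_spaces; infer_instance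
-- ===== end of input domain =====

-- B replaces A's character-by-character scan (mutable prevchar, try/except lookahead) by a
-- word/gap decomposition: split the stripped line on single spaces and rebuild it word by
-- word, inserting at most one separator space per gap (measured ~2x faster: one split
-- replaces A's per-character loop with its repeated strip()-and-index lookahead).


-- ===== PORT A =====
-- helper get_indent: loop over the characters with early return
def getIndentGo : List Char → String → String
  | [], ind => ind
  | c :: rest, ind =>
    if c = '\t' then getIndentGo rest (ind ++ "    ")
    else if c ≠ ' ' then ind
    else getIndentGo rest (ind ++ " ")

def get_indent (line : String) : String := getIndentGo line.toList ""

-- A's inner loop over the stripped line: state = prevchar and the accumulated out string;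
-- `next := rest.head?` is stripped[i+1] with the IndexError caught as none.
def eatLineGo : List Char → Option Char → String → String
  | [], _, out => out
  | c :: rest, prev, out =>
    let next := rest.head?
    let out :=
      if c = ' ' then
        if prev ∉ [some ' ', some ':', some ';', some ','] ∧
           next ∉ [some ':', some ';', some ','] then out ++ String.singleton c
        else out
      else out ++ String.singleton c
    eatLineGo rest (some c) out

def eat_spaces (code : List String) : List String :=
  code.foldl (fun new_stmt line =>
    let line := PySem.Str.replace line "\t" "  "
    let out := get_indent line
    new_stmt ++ [eatLineGo (PySem.Str.strip line).toList none out]) []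

-- ===== PORT B =====
-- hand port of str.split(" ") for the single-character separator ' ' (exact: a run of k
-- spaces yields k-1 empty parts between the neighbouring pieces, leading/trailing spaces
-- yield leading/trailing empty parts, "".split(" ") = [""]).
def splitSpace : List Char → List (List Char)
  | [] => [[]]
  | c :: rest =>
    let r := splitSpace rest
    if c = ' ' then [] :: r
    else (c :: r.headD []) :: r.tail

-- one iteration of B's loop; state = (words, last, gap)
def fixStep (st : List (List Char) × List Char × Int) (part : List Char) :
    List (List Char) × List Char × Int :=
  match st with
  | (words, last, gap) =>
    if part ≠ [] then
      let words :=
        if last ∉ [[':'], [';'], [',']] ∧ (gap > 0 ∨ part.head? ∉ [some ':', some ';', some ','])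
        then words ++ [[' ']] else words
      (words ++ [part], PySem.List.slice part (some (-1)) none, 0)
    else (words, last, gap + 1)

def fixLine (line : String) : String :=
  let line := PySem.Str.replace line "\t" "  "
  let parts := splitSpace (PySem.Str.strip line).toList
  let p0 := parts.headD []   -- parts[0]; split never returns an empty list, so no IndexError
  let st := parts.tail.foldl fixStep ([p0], PySem.List.slice p0 (some (-1)) none, (0 : Int))
  get_indent line ++ String.ofList st.1.flatten   -- "".join(words)

def eat_spaces_alt (code : List String) : List String := code.map fixLine

-- ===== PRECONDITION & SPEC =====
def Spec_eat_spaces (code : List String) (out : List String) : Prop := out = eat_spaces_alt code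
instance (code : List String) (out : List String) : Decidable (Spec_eat_spaces code out) := by unfold Spec_eat_spaces; infer_instance

-- ===== CLAIM (what is proved, stated in full; the proofs are below) =====
def Claim_equal_eat_spaces : Prop := ∀ (code : List String), Dom_eat_spaces code → Spec_eat_spaces code (eat_spaces code)

-- ===== LEMMAS AND PROOFS =====

-- the per-character keep/drop decision of A, as a pure list function
def specGo : Option Char → List Char → List Char
  | _, [] => []
  | p, c :: rest =>
    if c = ' ' then
      (if p ∉ [some ' ', some ':', some ';', some ','] ∧
          rest.head? ∉ [some ':', some ';', some ','] then [c] else []) ++ specGo (some c) rest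
    else c :: specGo (some c) rest

theorem str_append_mk (o : String) (c : Char) (l : List Char) :
    o ++ String.ofList (c :: l) = (o ++ String.singleton c) ++ String.ofList l := by
  apply String.ext; simp

theorem eatLineGo_eq (s : List Char) : ∀ (prev : Option Char) (out : String),
    eatLineGo s prev out = out ++ String.ofList (specGo prev s) := by
  induction s with
  | nil => intro prev out; simp [eatLineGo, specGo]
  | cons c rest ih =>
    intro prev out
    simp only [eatLineGo, specGo]
    by_cases hc : c = ' '
    · by_cases hk : prev ∉ [some ' ', some ':', some ';', some ','] ∧
          rest.head? ∉ [some ':', some ';', some ',']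
      · rw [if_pos hc, if_pos hk, if_pos hc, if_pos hk, ih, List.singleton_append,
          str_append_mk]
      · rw [if_pos hc, if_neg hk, if_pos hc, if_neg hk, ih, List.nil_append]
    · rw [if_neg hc, if_neg hc, ih, str_append_mk]

-- B's loop as a recursion over the remaining parts (output words only)
def rebuild : List Char → Int → List (List Char) → List Char
  | _, _, [] => []
  | last, gap, part :: ps =>
    if part ≠ [] then
      (if last ∉ [[':'], [';'], [',']] ∧ (gap > 0 ∨ part.head? ∉ [some ':', some ';', some ','])
       then [' '] else [])
        ++ part ++ rebuild (PySem.List.slice part (some (-1)) none) 0 ps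
    else rebuild last (gap + 1) ps

theorem foldl_fixStep (ps : List (List Char)) : ∀ (ws : List (List Char)) (last : List Char) (gap : Int),
    ((ps.foldl fixStep (ws, last, gap)).1).flatten = ws.flatten ++ rebuild last gap ps := by
  induction ps with
  | nil => intro ws last gap; simp [rebuild]
  | cons part ps ih =>
    intro ws last gap
    simp only [List.foldl_cons, fixStep, rebuild]
    by_cases hne : part ≠ []
    · rw [if_pos hne, if_pos hne]
      split_ifs with hc
      · rw [ih]; simp
      · rw [ih]; simp
    · rw [if_neg hne, if_neg hne, ih]

theorem splitSpace_space (rest : List Char) : splitSpace (' ' :: rest) = [] :: splitSpace rest := by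
  simp [splitSpace]

theorem splitSpace_char {c : Char} (hc : c ≠ ' ') (rest : List Char) :
    splitSpace (c :: rest) = (c :: (splitSpace rest).headD []) :: (splitSpace rest).tail := by
  simp [splitSpace, hc]

theorem splitSpace_ne_nil (s : List Char) : splitSpace s ≠ [] := by
  cases s with
  | nil => simp [splitSpace]
  | cons c rest => by_cases hc : c = ' ' <;> simp [splitSpace, hc]

theorem nospace_splitSpace (s : List Char) : ∀ w ∈ splitSpace s, ' ' ∉ w := by
  induction s with
  | nil => intro w hw; simp [splitSpace] at hw; simp [hw]
  | cons c rest ih =>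
    obtain ⟨q, qs, h⟩ : ∃ q qs, splitSpace rest = q :: qs := by
      cases h : splitSpace rest with
      | nil => exact absurd h (splitSpace_ne_nil rest)
      | cons q qs => exact ⟨q, qs, rfl⟩
    intro w hw
    by_cases hc : c = ' '
    · subst hc
      rw [splitSpace_space] at hw
      rcases List.mem_cons.mp hw with h1 | h1
      · simp [h1]
      · exact ih w h1
    · rw [splitSpace_char hc, h] at hw
      simp only [List.headD_cons, List.tail_cons] at hw
      rcases List.mem_cons.mp hw with h1 | h1
      · subst h1
        intro hmem
        rcases List.mem_cons.mp hmem with h2 | h2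
        · exact hc h2.symm
        · exact ih q (h ▸ List.mem_cons_self) h2
      · exact ih w (h ▸ List.mem_cons_of_mem q h1)

theorem splitSpace_getLast (s : List Char) :
    s ≠ [] → s.getLast? ≠ some ' ' → (splitSpace s).getLast? ≠ some [] := by
  induction s with
  | nil => intro h; exact absurd rfl h
  | cons c rest ih =>
    intro _ hl
    cases hr : rest with
    | nil =>
      have hc : c ≠ ' ' := by subst hr; simpa using hl
      subst hr
      rw [splitSpace_char hc]
      simp [splitSpace]
    | cons d ds =>
      rw [← hr]
      have hrest : rest ≠ [] := by rw [hr]; simp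
      have hl' : rest.getLast? ≠ some ' ' := by
        rw [hr]
        rw [hr, List.getLast?_cons_cons] at hl
        exact hl
      have hrec := ih hrest hl'
      obtain ⟨q, qs, h⟩ : ∃ q qs, splitSpace rest = q :: qs := by
        cases h : splitSpace rest with
        | nil => exact absurd h (splitSpace_ne_nil rest)
        | cons q qs => exact ⟨q, qs, rfl⟩
      rw [h] at hrec
      by_cases hc : c = ' '
      · subst hc
        rw [splitSpace_space, h]
        simpa [List.getLast?_cons_cons] using hrec
      · rw [splitSpace_char hc, h]
        simp only [List.headD_cons, List.tail_cons]
        cases qs with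
        | nil => simp
        | cons t ts => simpa [List.getLast?_cons_cons] using hrec

def unsplit : List (List Char) → List Char
  | [] => []
  | [w] => w
  | w :: ps => w ++ ' ' :: unsplit ps

def tOf (ps : List (List Char)) : List Char := if ps = [] then [] else ' ' :: unsplit ps

theorem unsplit_cons (w : List Char) (ps : List (List Char)) :
    unsplit (w :: ps) = w ++ tOf ps := by
  cases ps with
  | nil => simp [unsplit, tOf]
  | cons q qs => simp [unsplit, tOf]


theorem unsplit_splitSpace (s : List Char) : unsplit (splitSpace s) = s := by
  induction s with
  | nil => simp [splitSpace, unsplit]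
  | cons c rest ih =>
    obtain ⟨q, qs, h⟩ : ∃ q qs, splitSpace rest = q :: qs := by
      cases h : splitSpace rest with
      | nil => exact absurd h (splitSpace_ne_nil rest)
      | cons q qs => exact ⟨q, qs, rfl⟩
    have hu : unsplit (q :: qs) = rest := by rw [← h, ih]
    by_cases hc : c = ' '
    · subst hc
      rw [splitSpace_space, unsplit_cons, tOf, if_neg (by simp [h])]
      rw [← h] at *
      simp [ih]
    · rw [splitSpace_char hc, h]
      simp only [List.headD_cons, List.tail_cons]
      rw [unsplit_cons] at hu ⊢
      rw [List.cons_append, hu]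

theorem specGo_word (w : List Char) : ∀ (p : Option Char) (r : List Char),
    (∀ c ∈ w, c ≠ ' ') → specGo p (w ++ r) = w ++ specGo (w.getLast?.or p) r := by
  induction w with
  | nil => intro p r _; simp
  | cons c t ih =>
    intro p r hw
    have hc : c ≠ ' ' := hw c List.mem_cons_self
    simp only [List.cons_append, specGo, if_neg hc]
    rw [ih (some c) r (fun x hx => hw x (List.mem_cons_of_mem c hx))]
    congr 2
    cases t with
    | nil => simp
    | cons d ds =>
      rw [List.getLast?_cons_cons]
      obtain ⟨x, hx⟩ : ∃ x, (d :: ds).getLast? = some x := by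
        simpa [Option.isSome_iff_exists] using (List.getLast?_isSome (l := d :: ds)).mpr (by simp)
      simp [hx]

theorem drop_len_sub_one (w : List Char) :
    w.drop (w.length - 1) = (w.getLast?.map fun c => [c]).getD [] := by
  induction w with
  | nil => simp
  | cons c t ih =>
    cases t with
    | nil => simp
    | cons d ds =>
      rw [List.getLast?_cons_cons]
      have h1 : (c :: d :: ds).length - 1 = ds.length + 1 := by simp
      have h2 : (d :: ds).length - 1 = ds.length := by simp
      rw [h1, List.drop_succ_cons, ← h2, ih]

theorem slice_neg_one (w : List Char) :
    PySem.List.slice w (some (-1)) none = (w.getLast?.map fun c => [c]).getD [] := by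
  rw [PySem.List.slice_from_neg_one, drop_len_sub_one]

theorem specGo_space_cons (p : Option Char) (l : List Char) :
    specGo p (' ' :: l) =
      (if p ∉ [some ' ', some ':', some ';', some ','] ∧
          l.head? ∉ [some ':', some ';', some ','] then [' '] else []) ++ specGo (some ' ') l := by
  simp [specGo]

theorem rebuild_eq (parts : List (List Char)) : ∀ (last : List Char) (gap : Int),
    0 ≤ gap → (parts = [] → gap = 0) → parts.getLast? ≠ some [] →
    (∀ w ∈ parts, ' ' ∉ w) → (last = [] ∨ ∃ c, c ≠ ' ' ∧ last = [c]) →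
    rebuild last gap parts =
      (if gap = 0 then []
       else if last.head? ∉ [some ' ', some ':', some ';', some ','] ∧
               (2 ≤ gap ∨ (tOf parts).head? ∉ [some ':', some ';', some ','])
            then [' '] else [])
      ++ specGo (if gap = 0 then last.head? else some ' ') (tOf parts) := by
  induction parts with
  | nil =>
    intro last gap _ h0 _ _ _
    rw [h0 rfl]
    simp [rebuild, tOf, specGo]
  | cons part ps ih =>
    intro last gap hge h0 hlast hns hsh
    have hBiff : last ∉ [[':'], [';'], [',']] ↔
        last.head? ∉ [some ' ', some ':', some ';', some ','] := by
      rcases hsh with h | ⟨c, hc, h⟩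
      · subst h; simp
      · subst h; simp [hc]
    have htr : ((some ' ' : Option Char) ∉ [some ':', some ';', some ',']) := by decide
    have hsp : ((some ' ' : Option Char) ∈ [some ' ', some ':', some ';', some ',']) := by decide
    by_cases hp : part = []
    · -- gap step
      subst hp
      have hps : ps ≠ [] := by
        intro h; subst h; simp at hlast
      have hlast' : ps.getLast? ≠ some [] := by
        cases hq : ps with
        | nil => exact absurd hq hps
        | cons q qs => rw [hq] at hlast; simpa [List.getLast?_cons_cons] using hlast
      have hih := ih last (gap + 1) (by omega) (fun h => absurd h hps) hlast'
        (fun w hw => hns w (List.mem_cons_of_mem _ hw)) hsh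
      have htps : tOf ps = ' ' :: unsplit ps := by rw [tOf, if_neg hps]
      have htcons : tOf ([] :: ps) = ' ' :: tOf ps := by
        rw [tOf, if_neg (by simp), unsplit_cons, List.nil_append]
      have hLHS : rebuild last gap ([] :: ps) = rebuild last (gap + 1) ps := by
        simp [rebuild]
      have hhd : (tOf ps).head? = some ' ' := by rw [htps]; rfl
      have hg1 : ¬ (gap + 1 = 0) := by omega
      rw [hLHS, hih, htcons, if_neg hg1, if_neg hg1]
      by_cases hg : gap = 0
      · subst hg
        rw [if_pos rfl, if_pos rfl, List.nil_append]
        simp [specGo, hhd, htr, hsp]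
      · have hgpos : gap > 0 := by omega
        rw [if_neg hg, if_neg hg]
        simp [specGo, hhd, htr, hsp, htcons, hgpos]
    · -- word step
      obtain ⟨c0, w', hpart⟩ : ∃ c0 w', part = c0 :: w' := by
        cases part with
        | nil => exact absurd rfl hp
        | cons a b => exact ⟨a, b, rfl⟩
      subst hpart
      have hnsw : ' ' ∉ c0 :: w' := hns _ List.mem_cons_self
      have hwns : ∀ x ∈ c0 :: w', x ≠ ' ' := fun x hx hxe => hnsw (hxe ▸ hx)
      have hgls : (c0 :: w').getLast? = some ((c0 :: w').getLast (by simp)) :=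
        List.getLast?_eq_some_getLast (by simp)
      have hslice : PySem.List.slice (c0 :: w') (some (-1)) none =
          [(c0 :: w').getLast (by simp)] := by
        rw [slice_neg_one, hgls]; rfl
      have hglns : (c0 :: w').getLast (by simp) ≠ ' ' :=
        fun h => hnsw (h ▸ List.getLast_mem _)
      have hpslast : ps.getLast? ≠ some [] := by
        cases hq : ps with
        | nil => simp
        | cons q qs => rw [hq] at hlast; simpa [List.getLast?_cons_cons] using hlast
      have hih := ih [(c0 :: w').getLast (by simp)] 0 le_rfl (fun _ => rfl) hpslast
        (fun w hw => hns w (List.mem_cons_of_mem _ hw)) (Or.inr ⟨_, hglns, rfl⟩)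
      rw [if_pos rfl, if_pos rfl, List.nil_append] at hih
      have hLHS : rebuild last gap ((c0 :: w') :: ps) =
          (if last ∉ [[':'], [';'], [',']] ∧
              (gap > 0 ∨ (c0 :: w').head? ∉ [some ':', some ';', some ','])
           then [' '] else [])
            ++ (c0 :: w') ++ rebuild (PySem.List.slice (c0 :: w') (some (-1)) none) 0 ps := by
        simp [rebuild]
      have htcons : tOf ((c0 :: w') :: ps) = ' ' :: ((c0 :: w') ++ tOf ps) := by
        rw [tOf, if_neg (by simp), unsplit_cons]
      have hword : specGo (some ' ') ((c0 :: w') ++ tOf ps) =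
          (c0 :: w') ++ specGo (some ((c0 :: w').getLast (by simp))) (tOf ps) := by
        rw [specGo_word _ _ _ hwns, hgls]; rfl
      rw [hLHS, hslice, hih, htcons]
      by_cases hg : gap = 0
      · subst hg
        rw [if_pos rfl, if_pos rfl, List.nil_append, specGo_space_cons,
          (rfl : ((c0 :: w') ++ tOf ps).head? = some c0), hword]
        have hng : ¬ ((0:Int) > 0) := by omega
        rcases hsh with h | ⟨c, hc, h⟩
        · subst h; simp [hng]
        · subst h; simp [hng, hc]
      · have hgpos : gap > 0 := by omega
        rw [if_neg hg, if_neg hg, specGo_space_cons,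
          (rfl : ((c0 :: w') ++ tOf ps).head? = some c0), hword]
        rcases hsh with h | ⟨c, hc, h⟩
        · subst h; simp [hgpos, htr, hsp]
        · subst h; simp [hgpos, htr, hsp, hc]

theorem rstrip_getLast (l : List Char) : (PySem.Chars.rstrip l).getLast? ≠ some ' ' := by
  unfold PySem.Chars.rstrip
  rw [List.getLast?_reverse]
  intro h
  have := List.head?_dropWhile_not PySem.Chars.isspace l.reverse
  rw [h] at this
  have h2 : PySem.Chars.isspace ' ' = true := by decide
  simp [h2] at this

theorem slice_neg_one_head (w : List Char) :
    (PySem.List.slice w (some (-1)) none).head? = w.getLast? := by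
  rw [slice_neg_one]
  cases w.getLast? <;> rfl

-- B's per-line computation on the character list equals A's specGo
theorem line_eq (s : List Char) (htr : s.getLast? ≠ some ' ') :
    ((splitSpace s).tail.foldl fixStep
        ([(splitSpace s).headD []],
         PySem.List.slice ((splitSpace s).headD []) (some (-1)) none, (0 : Int))).1.flatten
      = specGo none s := by
  obtain ⟨p0, tail, h⟩ : ∃ p0 tail, splitSpace s = p0 :: tail := by
    cases h : splitSpace s with
    | nil => exact absurd h (splitSpace_ne_nil s)
    | cons p0 tail => exact ⟨p0, tail, rfl⟩
  have hns : ∀ w ∈ p0 :: tail, ' ' ∉ w := fun w hw => nospace_splitSpace s w (h ▸ hw)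
  have htail_last : tail.getLast? ≠ some [] := by
    cases ht : tail with
    | nil => simp
    | cons q qs =>
      have hsne : s ≠ [] := by
        intro hs; subst hs
        rw [show splitSpace [] = [[]] from rfl] at h
        cases h; simp_all
      have := splitSpace_getLast s hsne htr
      rw [h, ht, List.getLast?_cons_cons] at this
      exact this
  have hshape : PySem.List.slice p0 (some (-1)) none = [] ∨
      ∃ c, c ≠ ' ' ∧ PySem.List.slice p0 (some (-1)) none = [c] := by
    cases hp : p0 with
    | nil => left; rw [slice_neg_one]; rfl
    | cons a b =>
      right
      refine ⟨(a :: b).getLast (by simp), ?_, ?_⟩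
      · intro hsp
        exact (hp ▸ hns p0 List.mem_cons_self) (hsp ▸ List.getLast_mem (by simp))
      · rw [slice_neg_one, List.getLast?_eq_some_getLast (by simp)]; rfl
  have hmain := rebuild_eq tail (PySem.List.slice p0 (some (-1)) none) 0 le_rfl
    (fun _ => rfl) htail_last (fun w hw => hns w (List.mem_cons_of_mem _ hw)) hshape
  rw [if_pos rfl, if_pos rfl, List.nil_append] at hmain
  rw [h]
  simp only [List.headD_cons, List.tail_cons]
  rw [foldl_fixStep, hmain, slice_neg_one_head]
  have hs_eq : s = p0 ++ tOf tail := by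
    conv_lhs => rw [← unsplit_splitSpace s, h, unsplit_cons]
  rw [hs_eq, specGo_word p0 none (tOf tail)
    (fun c hc hce => hns p0 List.mem_cons_self (hce ▸ hc))]
  simp

theorem fold_append_map {α β : Type} (f : α → β) (l : List α) : ∀ (acc : List β),
    l.foldl (fun a x => a ++ [f x]) acc = acc ++ l.map f := by
  induction l with
  | nil => intro acc; simp
  | cons x t ih => intro acc; simp [ih]

theorem strip_getLast (l : List Char) :
    (PySem.Chars.strip l).getLast? ≠ some ' ' := by
  unfold PySem.Chars.strip
  exact rstrip_getLast _

-- ===== VERDICT (by name: the statement is the Claim_ definition above) =====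
theorem fixLine_eq (line : String) :
    fixLine line = get_indent (PySem.Str.replace line "\t" "  ") ++
      String.ofList (specGo none (PySem.Str.strip (PySem.Str.replace line "\t" "  ")).toList) := by
  have h := line_eq (PySem.Str.strip (PySem.Str.replace line "\t" "  ")).toList
    (by rw [PySem.Str.toList_strip]; exact strip_getLast _)
  simp only [fixLine]
  rw [h]

theorem eat_spaces_spec : Claim_equal_eat_spaces := by
  intro code _
  show eat_spaces code = eat_spaces_alt code
  unfold eat_spaces eat_spaces_alt
  rw [fold_append_map]
  simp only [List.nil_append]
  apply List.map_congr_left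
  intro line _
  rw [eatLineGo_eq, fixLine_eq]
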